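-- pv_equiv track=rewrite | github.com/Sanmitha-Sadhishkumar/numbsys | numsys.py | dtoo
-- ===== SOURCE A (Python) =====
-- def dtoo(a):
--     i,o,r=0,0,int()
--     while a:
--         r=a%8
--         o+=r*pow(10,i)
--         a//=8
--         i+=1
--     return o
-- ===== SOURCE B (Python) =====
-- def dtoo(a):
--     if a == 0:
--         return 0
--     return dtoo(a // 8) * 10 + a % 8
-- ===== Notes on version B (the rewrite author's own statement) =====
-- stated objective: simpler
-- what changed: Replaces the while loop with its place-value accumulator and pow call by a direct recursion on the base-eight digit recurrence.
import Mathlib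
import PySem

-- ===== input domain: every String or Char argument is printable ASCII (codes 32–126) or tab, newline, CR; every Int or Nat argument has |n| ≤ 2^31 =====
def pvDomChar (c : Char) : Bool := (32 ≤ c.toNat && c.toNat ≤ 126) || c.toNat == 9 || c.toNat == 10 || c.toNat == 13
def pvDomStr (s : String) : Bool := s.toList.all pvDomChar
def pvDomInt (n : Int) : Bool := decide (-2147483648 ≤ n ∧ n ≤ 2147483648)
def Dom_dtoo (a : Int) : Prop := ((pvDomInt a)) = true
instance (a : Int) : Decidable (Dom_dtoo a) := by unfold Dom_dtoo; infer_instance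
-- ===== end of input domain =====

-- B replaces A's while loop (explicit place-value accumulator with a pow call) by a
-- direct recursion on the base-8 recurrence. For a < 0 neither Python returns (A loops,
-- B exceeds the recursion limit), so no input with a return value is excluded.

-- fdiv→ediv bridge, cited by the termination proofs of both ports
theorem pvFdiv8_eq (a : Int) : Int.fdiv a 8 = a / 8 := by
  simp [Int.fdiv_eq_ediv]

-- ===== PORT A =====
-- A's while loop: state (a, i, o); the `a ≤ 0` guard only makes the function total in
-- Lean — Python A diverges for a < 0, which Pre_dtoo excludes.
def dtooLoop (a : Int) (i : Nat) (o : Int) : Int :=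
  if h : a ≤ 0 then o
  else
    dtooLoop (PySem.Int.floordiv a 8) (i + 1) (o + (PySem.Int.mod a 8) * 10 ^ i)
termination_by a.toNat
decreasing_by
  have : PySem.Int.floordiv a 8 < a := by
    simp [PySem.Int.floordiv, pvFdiv8_eq]
    omega
  omega

def dtoo (a : Int) : Int := dtooLoop a 0 0

-- ===== PORT B =====
-- direct recursion on the base-eight digit recurrence, base case zero; the `a ≤ 0` guard again only
-- totalises the Lean function (Python B hits the recursion limit for a < 0).
def dtoo_alt (a : Int) : Int :=
  if h : a ≤ 0 then 0
  else dtoo_alt (PySem.Int.floordiv a 8) * 10 + PySem.Int.mod a 8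
termination_by a.toNat
decreasing_by
  have : PySem.Int.floordiv a 8 < a := by
    simp [PySem.Int.floordiv, pvFdiv8_eq]
    omega
  omega

-- ===== PRECONDITION & SPEC =====
def Spec_dtoo (a : Int) (out : Int) : Prop := out = dtoo_alt a
instance (a : Int) (out : Int) : Decidable (Spec_dtoo a out) := by unfold Spec_dtoo; infer_instance

-- ===== CLAIM (what is proved, stated in full; the proofs are below) =====
def Claim_equal_dtoo : Prop := ∀ (a : Int), Dom_dtoo a → Spec_dtoo a (dtoo a)

-- ===== LEMMAS AND PROOFS =====

-- Loop invariant: the accumulator form computes o + (recursive value) · 10^i.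
theorem dtooLoop_eq (n : Nat) : ∀ (a : Int), a.toNat ≤ n → ∀ (i : Nat) (o : Int),
    dtooLoop a i o = o + dtoo_alt a * 10 ^ i := by
  induction n with
  | zero =>
      intro a ha i o
      have : a ≤ 0 := by omega
      rw [dtooLoop, dtoo_alt]
      simp [this]
  | succ n ih =>
      intro a ha i o
      by_cases h : a ≤ 0
      · rw [dtooLoop, dtoo_alt]; simp [h]
      · have ha' : 0 < a := lt_of_not_ge h
        have hfd : (PySem.Int.floordiv a 8).toNat ≤ n := by
          simp [PySem.Int.floordiv, pvFdiv8_eq]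
          omega
        rw [dtooLoop, dtoo_alt]
        simp only [h, dite_false]
        rw [ih _ hfd]
        ring

-- ===== VERDICT (by name: the statement is the Claim_ definition above) =====
theorem dtoo_spec : Claim_equal_dtoo := by
  intro a _
  unfold Spec_dtoo dtoo
  simpa using dtooLoop_eq a.toNat a le_rfl 0 0
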